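-- pv_equiv track=rewrite | github.com/tkdgns8234/DataStructure-Algorithm | Algorithm/프로그래머스/2021_KAKAO_BLIND_REC/lv3_카드_짝_맞추기.py | move_cost
-- ===== SOURCE A (Python) =====
-- from collections import defaultdict, deque
--
-- def move_cost(board, start, end):   # 조작 횟수 Count
--     if start==end: return 0
--     queue, visit = deque([[start[0], start[1], 0]]), {start}
--     while queue:                    # BFS
--         x, y, c = queue.popleft()
--         for dx, dy in [(0,1),(0,-1),(1,0),(-1,0)]:
--             nx, ny = x+dx, y+dy     # Normal move
--             cx, cy = x, y
--             while True:             # Ctrl + move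
--                 cx, cy = cx+dx, cy+dy
--                 if not (0 <= cx <= 3 and 0 <= cy <= 3):
--                     cx, cy = cx-dx, cy-dy
--                     break
--                 elif board[cx][cy] != 0:
--                     break
--
--             if (nx, ny) == end or (cx, cy) == end:  # 도착 최단 경로
--                 return c+1
--
--             if (0 <= nx <= 3 and 0 <= ny <= 3) and (nx, ny) not in visit:
--                 queue.append((nx, ny, c+1))
--                 visit.add((nx, ny))
--             if (cx, cy) not in visit:
--                 queue.append((cx, cy, c+1))
--                 visit.add((cx, cy))
-- ===== SOURCE B (Python) =====
-- DIRS = ((0, 1), (0, -1), (1, 0), (-1, 0))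
--
-- def targets(board, x, y, dx, dy):
--     """(one-step cell, ctrl-slide stop cell) from (x, y) in direction (dx, dy)."""
--     cx, cy = x, y
--     while 0 <= cx + dx <= 3 and 0 <= cy + dy <= 3 and board[cx + dx][cy + dy] == 0:
--         cx, cy = cx + dx, cy + dy
--     if 0 <= cx + dx <= 3 and 0 <= cy + dy <= 3:
--         cx, cy = cx + dx, cy + dy
--     return (x + dx, y + dy), (cx, cy)
--
-- def move_cost(board, start, end):
--     if start == end:
--         return 0
--     # Phase 1: label every reachable cell with its button-press distance,
--     # Bellman-Ford style: relax every labelled cell, round after round, to a fixpoint.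
--     dist = {start: 0}
--     changed = True
--     while changed:
--         changed = False
--         for u, du in list(dist.items()):
--             for dx, dy in DIRS:
--                 raw, slide = targets(board, u[0], u[1], dx, dy)
--                 if 0 <= raw[0] <= 3 and 0 <= raw[1] <= 3 and raw not in dist:
--                     dist[raw] = du + 1
--                     changed = True
--                 if slide not in dist:
--                     dist[slide] = du + 1
--                     changed = True
--     # Phase 2: the answer is one press more than the closest labelled cell
--     # from which a single press lands exactly on `end`.
--     best = None
--     for u, du in dist.items():
--         for dx, dy in DIRS:
--             raw, slide = targets(board, u[0], u[1], dx, dy)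
--             if (raw == end or slide == end) and (best is None or du + 1 < best):
--                 best = du + 1
--     return best
-- ===== Notes on version B (the rewrite author's own statement) =====
-- stated objective: alternative
-- what changed: Replaces A's single early-returning deque BFS by a two-phase Bellman-Ford-style algorithm: phase 1 relaxes every labelled cell round after round until the distance table reaches a fixpoint (no queue, no early exit, end is not consulted at all), phase 2 answers with a separate minimum query over the finished table (smallest label among cells one press away from end).
-- outside the precondition, e.g. on move_cost([], (4, 0), (5, 0)): A returns 1, B raises IndexError
import Mathlib
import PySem

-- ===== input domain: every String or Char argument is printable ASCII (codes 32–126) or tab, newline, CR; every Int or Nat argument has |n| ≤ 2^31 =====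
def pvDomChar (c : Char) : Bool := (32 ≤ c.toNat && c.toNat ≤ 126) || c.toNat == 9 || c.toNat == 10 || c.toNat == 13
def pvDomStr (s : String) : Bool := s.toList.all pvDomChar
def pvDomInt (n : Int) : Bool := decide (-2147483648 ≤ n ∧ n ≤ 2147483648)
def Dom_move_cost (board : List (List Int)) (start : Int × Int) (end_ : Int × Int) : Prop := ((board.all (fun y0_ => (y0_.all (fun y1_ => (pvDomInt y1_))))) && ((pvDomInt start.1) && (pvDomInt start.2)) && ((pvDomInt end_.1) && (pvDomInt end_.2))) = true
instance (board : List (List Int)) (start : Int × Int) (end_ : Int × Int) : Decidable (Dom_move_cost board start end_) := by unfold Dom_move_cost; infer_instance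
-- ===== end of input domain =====

-- B replaces A's early-returning deque BFS by a two-phase algorithm: phase 1 labels every reachable
-- cell with its press distance by Bellman-Ford-style relaxation rounds run to a fixpoint (no queue,
-- no early exit, 'end' never consulted), phase 2 answers with a separate minimum query over the
-- finished table; objective: alternative, same cost.

-- shared domain helpers: '0 <= x <= 3 and 0 <= y <= 3' and 'board[x][y]'
-- (board access is exact under Pre_ — both programs only index with x,y in 0..3 and Pre_
-- guarantees those rows/columns exist; where Python would raise IndexError lies outside Pre_)
def pvInG (x y : Int) : Bool := decide (0 ≤ x) && decide (x ≤ 3) && decide (0 ≤ y) && decide (y ≤ 3)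
def pvCell (board : List (List Int)) (x y : Int) : Int :=
  PySem.List.pyGetD (PySem.List.pyGetD board x []) y 0

-- ===== PORT A =====
def pvDirsAList : List (Int × Int) := [(0, 1), (0, -1), (1, 0), (-1, 0)]

-- A's inner 'while True' ctrl-move loop: step, revert-and-break if out of the grid, break on a
-- non-zero cell.  Fuel 9 strictly exceeds the ≤ 5 iterations the Python loop can make.
def pvCtrlA (board : List (List Int)) (fuel : Nat) (cx cy dx dy : Int) : Int × Int :=
  match fuel with
  | 0 => (cx, cy)
  | f + 1 =>
    let nx := cx + dx
    let ny := cy + dy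
    if !(pvInG nx ny) then (cx, cy)
    else if pvCell board nx ny ≠ 0 then (nx, ny)
    else pvCtrlA board f nx ny dx dy

-- A's 'for dx, dy in [...]' body: early 'return c+1' is Sum.inl, otherwise the updated
-- (queue, visit) pair is Sum.inr.
def pvDirsA (board : List (List Int)) (end_ : Int × Int) (x y c : Int) :
    List (Int × Int) → List (Int × Int × Int) → PySem.Set (Int × Int) →
      Sum Int (List (Int × Int × Int) × PySem.Set (Int × Int))
  | [], q, v => .inr (q, v)
  | (dx, dy) :: ds, q, v =>
    let nx := x + dx
    let ny := y + dy
    let cc := pvCtrlA board 9 x y dx dy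
    if (nx, ny) = end_ ∨ cc = end_ then .inl (c + 1)
    else
      let qv1 := if pvInG nx ny && !(PySem.Set.contains v (nx, ny)) then
          (q ++ [(nx, ny, c + 1)], PySem.Set.add v (nx, ny)) else (q, v)
      let qv2 := if !(PySem.Set.contains qv1.2 cc) then
          (qv1.1 ++ [(cc.1, cc.2, c + 1)], PySem.Set.add qv1.2 cc) else qv1
      pvDirsA board end_ x y c ds qv2.1 qv2.2

-- A's 'while queue' BFS loop; fuel 32 strictly exceeds the ≤ 18 pops the Python loop can make
-- (each enqueued cell is fresh in 'visit' ⊆ {start} ∪ grid, so at most 17 cells are ever queued).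
def pvLoopA (board : List (List Int)) (end_ : Int × Int) :
    Nat → List (Int × Int × Int) → PySem.Set (Int × Int) → Option Int
  | fuel, q, v =>
    match q with
    | [] => none
    | (x, y, c) :: rest =>
      match fuel with
      | 0 => none
      | f + 1 =>
        match pvDirsA board end_ x y c pvDirsAList rest v with
        | .inl a => some a
        | .inr (q', v') => pvLoopA board end_ f q' v'

def move_cost (board : List (List Int)) (start : Int × Int) (end_ : Int × Int) : Option Int :=
  if start = end_ then some 0
  else pvLoopA board end_ 32 [(start.1, start.2, 0)] (PySem.Set.ofList [start])

-- ===== PORT B =====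
def pvDirsB : List (Int × Int) := [(0, 1), (0, -1), (1, 0), (-1, 0)]

-- Source B's advance-while slide loop; fuel 8 strictly exceeds its ≤ 4 advances.
def pvSlideLoop (board : List (List Int)) (fuel : Nat) (cx cy dx dy : Int) : Int × Int :=
  match fuel with
  | 0 => (cx, cy)
  | f + 1 =>
    if pvInG (cx + dx) (cy + dy) && (pvCell board (cx + dx) (cy + dy) == 0) then
      pvSlideLoop board f (cx + dx) (cy + dy) dx dy
    else (cx, cy)

-- Source B's targets
def pvPairFor (board : List (List Int)) (x y dx dy : Int) : (Int × Int) × (Int × Int) :=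
  let s := pvSlideLoop board 8 x y dx dy
  let s' := if pvInG (s.1 + dx) (s.2 + dy) then (s.1 + dx, s.2 + dy) else s
  ((x + dx, y + dy), s')

-- body of phase 1's innermost 'for dx, dy in DIRS' iteration, on one (raw, slide) pair
def pvRelaxPair (du : Int) (st : PySem.Dict (Int × Int) Int × Bool)
    (ts : (Int × Int) × (Int × Int)) : PySem.Dict (Int × Int) Int × Bool :=
  let st1 := if pvInG ts.1.1 ts.1.2 && !(PySem.Dict.contains st.1 ts.1) then
      (PySem.Dict.insert st.1 ts.1 (du + 1), true) else st
  if !(PySem.Dict.contains st1.1 ts.2) then (PySem.Dict.insert st1.1 ts.2 (du + 1), true) else st1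

-- one '(u, du)' item of a relaxation round (Source B's inner double loop)
def pvRelaxItem (board : List (List Int)) (st : PySem.Dict (Int × Int) Int × Bool)
    (it : (Int × Int) × Int) : PySem.Dict (Int × Int) Int × Bool :=
  pvDirsB.foldl (fun s d => pvRelaxPair it.2 s (pvPairFor board it.1.1 it.1.2 d.1 d.2)) st

-- Source B's 'while changed' relaxation rounds; fuel 32 strictly exceeds the ≤ 17 rounds possible
-- (every continuing round adds a key, and keys ⊆ {start} ∪ grid has at most 17 elements).
def pvRounds (board : List (List Int)) :
    Nat → PySem.Dict (Int × Int) Int → PySem.Dict (Int × Int) Int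
  | 0, D => D
  | f + 1, D =>
    let r := D.items.foldl (pvRelaxItem board) (D, false)
    if r.2 then pvRounds board f r.1 else r.1

-- body of phase 2's innermost iteration, on one (raw, slide) pair
def pvBestPair (end_ : Int × Int) (du : Int) (best : Option Int)
    (ts : (Int × Int) × (Int × Int)) : Option Int :=
  if (decide (ts.1 = end_) || decide (ts.2 = end_)) &&
     (match best with | none => true | some m => decide (du + 1 < m)) then
    some (du + 1)
  else best

-- one '(u, du)' item of phase 2's scan
def pvBestItem (board : List (List Int)) (end_ : Int × Int) (best : Option Int)
    (it : (Int × Int) × Int) : Option Int :=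
  pvDirsB.foldl (fun b d => pvBestPair end_ it.2 b (pvPairFor board it.1.1 it.1.2 d.1 d.2)) best

-- phase 2: 'for u, du in dist.items(): …'
def pvBest (board : List (List Int)) (end_ : Int × Int)
    (D : PySem.Dict (Int × Int) Int) : Option Int :=
  D.items.foldl (pvBestItem board end_) none

def move_cost_alt (board : List (List Int)) (start : Int × Int) (end_ : Int × Int) : Option Int :=
  if start = end_ then some 0
  else pvBest board end_ (pvRounds board 32 (PySem.Dict.insert PySem.Dict.empty start 0))

-- ===== PRECONDITION & SPEC =====
-- Pre_ excludes inputs where the BFS touches the grid although the board lacks a full 4x4 area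
-- (outside the problem's fixed 4x4 domain): there Python A raises IndexError on board[x][y] —
-- except for a few accidental early returns that B's eager target computation still indexes past.
def Pre_move_cost (board : List (List Int)) (start : Int × Int) (end_ : Int × Int) : Prop :=
  start = end_ ∨
  ¬ ((-1 ≤ start.1 ∧ start.1 ≤ 4 ∧ 0 ≤ start.2 ∧ start.2 ≤ 3) ∨
     (0 ≤ start.1 ∧ start.1 ≤ 3 ∧ -1 ≤ start.2 ∧ start.2 ≤ 4)) ∨
  (4 ≤ board.length ∧ ∀ row ∈ board.take 4, 4 ≤ row.length)
instance (board : List (List Int)) (start : Int × Int) (end_ : Int × Int) : Decidable (Pre_move_cost board start end_) := by unfold Pre_move_cost; infer_instance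

def pvWitness_move_cost : List (List Int) × (Int × Int) × (Int × Int) :=
  ([[1, 0, 0, 3], [0, 0, 0, 0], [0, 0, 0, 2], [3, 0, 1, 2]], (1, 0), (2, 3))

def Spec_move_cost (board : List (List Int)) (start : Int × Int) (end_ : Int × Int) (out : Option Int) : Prop := out = move_cost_alt board start end_
instance (board : List (List Int)) (start : Int × Int) (end_ : Int × Int) (out : Option Int) : Decidable (Spec_move_cost board start end_ out) := by unfold Spec_move_cost; infer_instance

-- ===== CLAIM (what is proved, stated in full; the proofs are below) =====
def Claim_equal_move_cost : Prop := ∀ (board : List (List Int)) (start : Int × Int) (end_ : Int × Int), Dom_move_cost board start end_ → Pre_move_cost board start end_ → Spec_move_cost board start end_ (move_cost board start end_)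

-- ===== LEMMAS AND PROOFS =====

-- proof-internal level-synchronized BFS, the bridge between A's deque and B's rounds
def pvStepPair (end_ : Int × Int)
    (st : PySem.Set (Int × Int) × List (Int × Int) × Bool) (p : (Int × Int) × (Int × Int)) :
    PySem.Set (Int × Int) × List (Int × Int) × Bool :=
  let h := if p.1 = end_ ∨ p.2 = end_ then true else st.2.2
  let vn1 := if pvInG p.1.1 p.1.2 && !(PySem.Set.contains st.1 p.1) then
      (PySem.Set.add st.1 p.1, st.2.1 ++ [p.1]) else (st.1, st.2.1)
  let vn2 := if !(PySem.Set.contains vn1.1 p.2) then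
      (PySem.Set.add vn1.1 p.2, vn1.2 ++ [p.2]) else vn1
  (vn2.1, vn2.2, h)

def pvTargets (board : List (List Int)) (cell : Int × Int) : List ((Int × Int) × (Int × Int)) :=
  pvDirsB.map (fun d => pvPairFor board cell.1 cell.2 d.1 d.2)

def pvProcCell (board : List (List Int)) (end_ : Int × Int)
    (st : PySem.Set (Int × Int) × List (Int × Int) × Bool) (cell : Int × Int) :
    PySem.Set (Int × Int) × List (Int × Int) × Bool :=
  (pvTargets board cell).foldl (pvStepPair end_) st

def pvFrontier (board : List (List Int)) (end_ : Int × Int) :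
    Nat → List (Int × Int) → PySem.Set (Int × Int) → Int → Option Int
  | fuel, frontier, v, level =>
    match frontier with
    | [] => none
    | _ :: _ =>
      match fuel with
      | 0 => none
      | f + 1 =>
        let r := frontier.foldl (pvProcCell board end_) (v, [], false)
        if r.2.2 = true then some (level + 1)
        else pvFrontier board end_ f r.2.1 r.1 (level + 1)

-- attach the same counter to every cell of a frontier (shape of A's queue within one BFS level)
def pvMapc (c : Int) (F : List (Int × Int)) : List (Int × Int × Int) :=
  F.map (fun p => (p.1, p.2, c))

def pvGridList : List (Int × Int) :=
  [(0,0),(0,1),(0,2),(0,3),(1,0),(1,1),(1,2),(1,3),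
   (2,0),(2,1),(2,2),(2,3),(3,0),(3,1),(3,2),(3,3)]

-- 'u can reach end_ with one press' (phase 2's hit test for one labelled cell)
def pvHit (board : List (List Int)) (end_ : Int × Int) (u : Int × Int) : Bool :=
  (pvTargets board u).any (fun ts => decide (ts.1 = end_) || decide (ts.2 = end_))

-- every one-press target of u is already a key (a cell whose relaxation can add nothing)
def pvClosed (board : List (List Int)) (v : List (Int × Int)) (u : Int × Int) : Prop :=
  ∀ ts ∈ pvTargets board u, (pvInG ts.1.1 ts.1.2 = true → ts.1 ∈ v) ∧ ts.2 ∈ v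

theorem pvClosed_mono (board : List (List Int)) (v w : List (Int × Int)) (u : Int × Int)
    (h : pvClosed board v u) : pvClosed board (v ++ w) u := by
  intro ts hts
  exact ⟨fun hg => List.mem_append_left _ ((h ts hts).1 hg), List.mem_append_left _ (h ts hts).2⟩

-- A's step-and-revert ctrl loop = B's advance-while slide loop plus one final guarded step
theorem pvCtrl_eq_slide (board : List (List Int)) (f : Nat) (dx dy : Int) :
    ∀ x y : Int, pvCtrlA board (f + 1) x y dx dy =
      (let s := pvSlideLoop board f x y dx dy
       if pvInG (s.1 + dx) (s.2 + dy) then (s.1 + dx, s.2 + dy) else s) := by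
  induction f with
  | zero =>
    intro x y
    simp only [pvCtrlA, pvSlideLoop]
    by_cases hg : pvInG (x + dx) (y + dy) = true <;>
      by_cases hc : pvCell board (x + dx) (y + dy) = 0 <;>
      simp [hg, hc]
  | succ f ih =>
    intro x y
    rw [show pvCtrlA board (f + 1 + 1) x y dx dy =
        (if !(pvInG (x + dx) (y + dy)) then (x, y)
         else if pvCell board (x + dx) (y + dy) ≠ 0 then (x + dx, y + dy)
         else pvCtrlA board (f + 1) (x + dx) (y + dy) dx dy) from rfl]
    rw [show pvSlideLoop board (f + 1) x y dx dy =
        (if pvInG (x + dx) (y + dy) && (pvCell board (x + dx) (y + dy) == 0) then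
          pvSlideLoop board f (x + dx) (y + dy) dx dy
         else (x, y)) from rfl]
    by_cases hg : pvInG (x + dx) (y + dy) = true
    · by_cases hc : pvCell board (x + dx) (y + dy) = 0
      · simpa [hg, hc] using ih (x + dx) (y + dy)
      · simp [hg, hc]
    · simp [hg]

theorem pvCtrl_eq_pair (board : List (List Int)) (x y dx dy : Int) :
    pvCtrlA board 9 x y dx dy = (pvPairFor board x y dx dy).2 := by
  have h := pvCtrl_eq_slide board 8 dx dy x y
  simpa [pvPairFor] using h

-- the slide target is in the grid or is the source cell itself
theorem pvSlideLoop_cases (board : List (List Int)) (f : Nat) (dx dy : Int) :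
    ∀ x y : Int, pvSlideLoop board f x y dx dy = (x, y) ∨
      pvInG (pvSlideLoop board f x y dx dy).1 (pvSlideLoop board f x y dx dy).2 = true := by
  induction f with
  | zero => intro x y; exact Or.inl rfl
  | succ f ih =>
    intro x y
    simp only [pvSlideLoop]
    by_cases hg : (pvInG (x + dx) (y + dy) && (pvCell board (x + dx) (y + dy) == 0)) = true
    · have hg1 : pvInG (x + dx) (y + dy) = true := by
        have := hg; simp only [Bool.and_eq_true] at this; exact this.1
      rcases ih (x + dx) (y + dy) with h | h
      · right; simp only [hg, if_pos, h]; exact hg1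
      · right; simpa [hg] using h
    · left; simp [hg]

theorem pvPair_slide_cases (board : List (List Int)) (x y dx dy : Int) :
    (pvPairFor board x y dx dy).2 = (x, y) ∨
      pvInG (pvPairFor board x y dx dy).2.1 (pvPairFor board x y dx dy).2.2 = true := by
  simp only [pvPairFor]
  by_cases hg : pvInG ((pvSlideLoop board 8 x y dx dy).1 + dx)
      ((pvSlideLoop board 8 x y dx dy).2 + dy) = true
  · right; simp [hg]
  · rcases pvSlideLoop_cases board 8 dx dy x y with h | h
    · rw [h] at hg ⊢; left; simp [hg]
    · right; simpa [hg] using h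

-- hit flag is monotone
theorem pvFoldPairs_hit (end_ : Int × Int) :
    ∀ (ps : List ((Int × Int) × (Int × Int))) (v : PySem.Set (Int × Int)) (n : List (Int × Int)),
      (ps.foldl (pvStepPair end_) (v, n, true)).2.2 = true := by
  intro ps
  induction ps with
  | nil => intro v n; rfl
  | cons p ps ih =>
    intro v n
    have hst : pvStepPair end_ (v, n, true) p =
        ((pvStepPair end_ (v, n, true) p).1, (pvStepPair end_ (v, n, true) p).2.1, true) := by
      simp only [pvStepPair]
      by_cases h : p.1 = end_ ∨ p.2 = end_ <;> simp [h]
    rw [List.foldl_cons, hst]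
    exact ih _ _

theorem pvProcCells_hit (board : List (List Int)) (end_ : Int × Int) :
    ∀ (F : List (Int × Int)) (v : PySem.Set (Int × Int)) (n : List (Int × Int)),
      (F.foldl (pvProcCell board end_) (v, n, true)).2.2 = true := by
  intro F
  induction F with
  | nil => intro v n; rfl
  | cons cell F ih =>
    intro v n
    rw [List.foldl_cons]
    rcases h : pvProcCell board end_ (v, n, true) cell with ⟨v2, n2, b2⟩
    have h1 : b2 = true := by
      have h2 := pvFoldPairs_hit end_ (pvTargets board cell) v n
      rw [show (pvTargets board cell).foldl (pvStepPair end_) (v, n, true) =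
          pvProcCell board end_ (v, n, true) cell from rfl, h] at h2
      exact h2
    rw [h1]
    exact ih _ _

-- NODE correspondence: A's direction loop on one popped cell vs one fold of the pair list
theorem pvNode (board : List (List Int)) (end_ : Int × Int) (x y : Int) (c : Int)
    (F : List (Int × Int)) :
    ∀ (ds : List (Int × Int)) (N : List (Int × Int)) (v : PySem.Set (Int × Int)),
      pvDirsA board end_ x y c ds (pvMapc c F ++ pvMapc (c + 1) N) v =
        (let r := (ds.map (fun d => pvPairFor board x y d.1 d.2)).foldl (pvStepPair end_) (v, N, false)
         if r.2.2 = true then Sum.inl (c + 1)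
         else Sum.inr (pvMapc c F ++ pvMapc (c + 1) r.2.1, r.1)) := by
  intro ds
  induction ds with
  | nil => intro N v; rfl
  | cons d ds ih =>
    intro N v
    obtain ⟨dx, dy⟩ := d
    simp only [pvDirsA, List.map_cons, List.foldl_cons]
    rw [pvCtrl_eq_pair board x y dx dy]
    have hp1 : (pvPairFor board x y dx dy).1 = (x + dx, y + dy) := rfl
    by_cases hhit : ((x + dx, y + dy) : Int × Int) = end_ ∨ (pvPairFor board x y dx dy).2 = end_
    · have hst : pvStepPair end_ (v, N, false) (pvPairFor board x y dx dy) =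
          ((pvStepPair end_ (v, N, false) (pvPairFor board x y dx dy)).1,
           (pvStepPair end_ (v, N, false) (pvPairFor board x y dx dy)).2.1, true) := by
        simp only [pvStepPair, hp1]
        simp [hhit]
      rw [hst]
      have := pvFoldPairs_hit end_ (ds.map (fun d => pvPairFor board x y d.1 d.2))
        (pvStepPair end_ (v, N, false) (pvPairFor board x y dx dy)).1
        (pvStepPair end_ (v, N, false) (pvPairFor board x y dx dy)).2.1
      simp only [this, if_pos]
      simp [hhit]
    · rw [if_neg hhit]
      have hstep : pvStepPair end_ (v, N, false) (pvPairFor board x y dx dy) =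
          (let vn1 := if pvInG (x + dx) (y + dy) && !(PySem.Set.contains v (x + dx, y + dy)) then
              (PySem.Set.add v (x + dx, y + dy), N ++ [((x + dx : Int), (y + dy : Int))])
            else (v, N)
           let vn2 := if !(PySem.Set.contains vn1.1 (pvPairFor board x y dx dy).2) then
              (PySem.Set.add vn1.1 (pvPairFor board x y dx dy).2,
               vn1.2 ++ [(pvPairFor board x y dx dy).2])
            else vn1
           (vn2.1, vn2.2, false)) := by
        simp only [pvStepPair, hp1]
        simp [hhit]
      rw [hstep]
      by_cases h1 : (pvInG (x + dx) (y + dy) && !(PySem.Set.contains v (x + dx, y + dy))) = true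
      · by_cases h2 : (!(PySem.Set.contains (PySem.Set.add v (x + dx, y + dy))
            (pvPairFor board x y dx dy).2)) = true
        · have := ih (N ++ [((x + dx : Int), (y + dy : Int))] ++ [(pvPairFor board x y dx dy).2])
            (PySem.Set.add (PySem.Set.add v (x + dx, y + dy)) (pvPairFor board x y dx dy).2)
          simp at h1 h2
          simpa [h1, h2, pvMapc, List.append_assoc] using this
        · have := ih (N ++ [((x + dx : Int), (y + dy : Int))])
            (PySem.Set.add v (x + dx, y + dy))
          simp at h1 h2
          have hc2 : ¬((pvPairFor board x y dx dy).2 ∉ v ∧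
              ¬(pvPairFor board x y dx dy).2 = ((x + dx : Int), (y + dy : Int))) := by tauto
          simpa [h1, hc2, pvMapc, List.append_assoc] using this
      · by_cases h2 : (!(PySem.Set.contains v (pvPairFor board x y dx dy).2)) = true
        · have := ih (N ++ [(pvPairFor board x y dx dy).2])
            (PySem.Set.add v (pvPairFor board x y dx dy).2)
          simp at h1 h2
          have hc1 : ¬(pvInG (x + dx) (y + dy) = true ∧
              ((x + dx : Int), (y + dy : Int)) ∉ v) := by tauto
          simpa [hc1, h2, pvMapc, List.append_assoc] using this
        · have := ih N v
          simp at h1 h2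
          have hc1 : ¬(pvInG (x + dx) (y + dy) = true ∧
              ((x + dx : Int), (y + dy : Int)) ∉ v) := by tauto
          simpa [hc1, h2, pvMapc, List.append_assoc] using this

-- one pair step appends the same fresh cells to visited and nxt; every appended cell is in the grid
theorem pvStep_ext (end_ : Int × Int) (v : PySem.Set (Int × Int)) (n : List (Int × Int)) (b : Bool)
    (p : (Int × Int) × (Int × Int)) (hslide : pvInG p.2.1 p.2.2 = true ∨ p.2 ∈ v)
    (hv : List.Nodup v) :
    ∃ δ0 : List (Int × Int),
      (pvStepPair end_ (v, n, b) p).1 = v ++ δ0 ∧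
      (pvStepPair end_ (v, n, b) p).2.1 = n ++ δ0 ∧
      (∀ q ∈ δ0, pvInG q.1 q.2 = true) ∧ List.Nodup (v ++ δ0) := by
  by_cases c1 : (pvInG p.1.1 p.1.2 && !(PySem.Set.contains v p.1)) = true
  · simp at c1
    have hg1 : pvInG p.1.1 p.1.2 = true := c1.1
    have hm1 : p.1 ∉ v := c1.2
    by_cases c2 : (!(PySem.Set.contains (PySem.Set.add v p.1) p.2)) = true
    · simp at c2
      obtain ⟨hm2a, hm2b⟩ := c2
      have hg2 : pvInG p.2.1 p.2.2 = true := hslide.resolve_right hm2a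
      refine ⟨[p.1, p.2], ?_, ?_, ?_, ?_⟩
      · simp [pvStepPair, hg1, hm1, hm2a, hm2b, List.append_assoc]
      · simp [pvStepPair, hg1, hm1, hm2a, hm2b, List.append_assoc]
      · intro q hq
        rcases List.mem_pair.mp hq with rfl | rfl
        · exact hg1
        · exact hg2
      · refine hv.append ?_ ?_
        · exact List.nodup_cons.mpr ⟨by simpa using fun h => hm2b (Eq.symm h), List.nodup_singleton _⟩
        · intro a ha hb
          rcases List.mem_pair.mp hb with rfl | rfl
          · exact hm1 ha
          · exact hm2a ha
    · simp at c2
      have hc2 : ¬(p.2 ∉ v ∧ ¬p.2 = p.1) := by tauto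
      refine ⟨[p.1], ?_, ?_, ?_, ?_⟩
      · simp [pvStepPair, hg1, hm1, hc2]
      · simp [pvStepPair, hg1, hm1, hc2]
      · intro q hq; rw [List.mem_singleton.mp hq]; exact hg1
      · refine hv.append (List.nodup_singleton _) ?_
        intro a ha hb
        rw [List.mem_singleton.mp hb] at ha
        exact hm1 ha
  · simp at c1
    have hc1 : ¬(pvInG p.1.1 p.1.2 = true ∧ p.1 ∉ v) := fun h => absurd (c1 h.1) h.2
    by_cases c2 : (!(PySem.Set.contains v p.2)) = true
    · simp at c2
      have hg2 : pvInG p.2.1 p.2.2 = true := hslide.resolve_right c2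
      refine ⟨[p.2], ?_, ?_, ?_, ?_⟩
      · simp [pvStepPair, hc1, c2]
      · simp [pvStepPair, hc1, c2]
      · intro q hq; rw [List.mem_singleton.mp hq]; exact hg2
      · refine hv.append (List.nodup_singleton _) ?_
        intro a ha hb
        rw [List.mem_singleton.mp hb] at ha
        exact c2 ha
    · simp at c2
      refine ⟨[], ?_, ?_, ?_, ?_⟩
      · simp [pvStepPair, hc1, c2]
      · simp [pvStepPair, hc1, c2]
      · intro q hq; simp at hq
      · simpa using hv

-- counting: visited is a nodup subset of {start} ∪ grid, so it has at most 17 cells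
theorem pvGrid_mem (p : Int × Int) (h : pvInG p.1 p.2 = true) : p ∈ pvGridList := by
  obtain ⟨a, b⟩ := p
  simp only [pvInG, Bool.and_eq_true, decide_eq_true_eq] at h
  obtain ⟨⟨⟨h1, h2⟩, h3⟩, h4⟩ := h
  have ha : a = 0 ∨ a = 1 ∨ a = 2 ∨ a = 3 := by omega
  have hb : b = 0 ∨ b = 1 ∨ b = 2 ∨ b = 3 := by omega
  rcases ha with rfl | rfl | rfl | rfl <;> rcases hb with rfl | rfl | rfl | rfl <;>
    simp [pvGridList]

theorem pvCard (s0 : Int × Int) (v : List (Int × Int)) (hnd : List.Nodup v)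
    (hsub : ∀ p ∈ v, pvInG p.1 p.2 = true ∨ p = s0) : v.length ≤ 17 := by
  have hsub2 : v ⊆ s0 :: pvGridList := by
    intro p hp
    rcases hsub p hp with h | h
    · exact List.mem_cons_of_mem _ (pvGrid_mem p h)
    · rw [h]; exact List.mem_cons_self ..
  have := (List.subperm_of_subset hnd hsub2).length_le
  simpa [pvGridList] using this

-- ================= joint simulation: pair step on (visited, nxt) vs on the distance dict ========

theorem pvStep_joint (end_ : Int × Int) (j : Int)
    (v n : List (Int × Int)) (b : Bool) (D : PySem.Dict (Int × Int) Int) (ch : Bool)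
    (ts : (Int × Int) × (Int × Int))
    (hkeys : D.keys = v) (hnd : List.Nodup v)
    (hslide : pvInG ts.2.1 ts.2.2 = true ∨ ts.2 ∈ v) :
    ∃ δ0 : List (Int × Int),
      (pvStepPair end_ (v, n, b) ts).1 = v ++ δ0 ∧
      (pvStepPair end_ (v, n, b) ts).2.1 = n ++ δ0 ∧
      (∀ q ∈ δ0, pvInG q.1 q.2 = true) ∧ List.Nodup (v ++ δ0) ∧
      (pvRelaxPair j (D, ch) ts).1.items = D.items ++ δ0.map (fun q => (q, j + 1)) ∧
      (pvRelaxPair j (D, ch) ts).2 = (ch || !δ0.isEmpty) ∧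
      (pvInG ts.1.1 ts.1.2 = true → ts.1 ∈ v ++ δ0) ∧ ts.2 ∈ v ++ δ0 := by
  have hcc : ∀ k, PySem.Dict.contains D k = PySem.Set.contains v k := by
    intro k
    rw [PySem.Dict.contains_eq_decide_mem_keys, hkeys, PySem.Set.contains_eq_decide]
  by_cases c1 : (pvInG ts.1.1 ts.1.2 && !(PySem.Set.contains v ts.1)) = true
  · simp at c1
    have hg1 : pvInG ts.1.1 ts.1.2 = true := c1.1
    have hm1 : ts.1 ∉ v := c1.2
    have hD1 : PySem.Dict.contains D ts.1 = false := by
      rw [hcc, PySem.Set.contains_eq_decide]; simp [hm1]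
    have hI1 : (D.insert ts.1 (j + 1)).items = D.items ++ [(ts.1, j + 1)] :=
      PySem.Dict.items_insert_of_not_contains D _ hD1
    have hK1 : (D.insert ts.1 (j + 1)).keys = v ++ [ts.1] := by
      rw [show (D.insert ts.1 (j + 1)).keys = (D.insert ts.1 (j + 1)).items.map Prod.fst from rfl,
        hI1, List.map_append, ← show D.keys = D.items.map Prod.fst from rfl, hkeys]
      rfl
    by_cases c2 : (!(PySem.Set.contains (PySem.Set.add v ts.1) ts.2)) = true
    · simp at c2
      obtain ⟨hm2a, hm2b⟩ := c2
      have hg2 : pvInG ts.2.1 ts.2.2 = true := hslide.resolve_right hm2a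
      have hD2 : PySem.Dict.contains (D.insert ts.1 (j + 1)) ts.2 = false := by
        rw [PySem.Dict.contains_eq_decide_mem_keys, hK1]
        simp [hm2a, hm2b]
      have hI2 : ((D.insert ts.1 (j + 1)).insert ts.2 (j + 1)).items
          = D.items ++ [(ts.1, j + 1), (ts.2, j + 1)] := by
        rw [PySem.Dict.items_insert_of_not_contains _ _ hD2, hI1, List.append_assoc]
        rfl
      refine ⟨[ts.1, ts.2], ?_, ?_, ?_, ?_, ?_, ?_, ?_, ?_⟩
      · simp [pvStepPair, hg1, hm1, hm2a, hm2b, List.append_assoc]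
      · simp [pvStepPair, hg1, hm1, hm2a, hm2b, List.append_assoc]
      · intro q hq
        rcases List.mem_pair.mp hq with rfl | rfl
        · exact hg1
        · exact hg2
      · refine hnd.append ?_ ?_
        · exact List.nodup_cons.mpr ⟨by simpa using fun h => hm2b (Eq.symm h), List.nodup_singleton _⟩
        · intro a ha hb
          rcases List.mem_pair.mp hb with rfl | rfl
          · exact hm1 ha
          · exact hm2a ha
      · simp only [pvRelaxPair, hcc]
        simp only [hg1, PySem.Set.contains_eq_decide, hm1]
        simp only [decide_false, Bool.not_false, Bool.and_true, if_true, hD2]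
        simpa using hI2
      · simp only [pvRelaxPair, hcc]
        simp only [hg1, PySem.Set.contains_eq_decide, hm1]
        simp [hD2]
      · intro _; exact List.mem_append_right _ (by simp)
      · exact List.mem_append_right _ (by simp)
    · simp at c2
      have hc2 : ¬(ts.2 ∉ v ∧ ¬ts.2 = ts.1) := by tauto
      have hm2 : ts.2 ∈ v ++ [ts.1] := by
        by_cases h : ts.2 = ts.1
        · rw [h]; exact List.mem_append_right _ (by simp)
        · exact List.mem_append_left _ (by tauto)
      have hD2 : PySem.Dict.contains (D.insert ts.1 (j + 1)) ts.2 = true := by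
        rw [PySem.Dict.contains_eq_decide_mem_keys, hK1]
        simp [hm2]
      refine ⟨[ts.1], ?_, ?_, ?_, ?_, ?_, ?_, ?_, ?_⟩
      · simp [pvStepPair, hg1, hm1, hc2]
      · simp [pvStepPair, hg1, hm1, hc2]
      · intro q hq; rw [List.mem_singleton.mp hq]; exact hg1
      · refine hnd.append (List.nodup_singleton _) ?_
        intro a ha hb
        rw [List.mem_singleton.mp hb] at ha
        exact hm1 ha
      · simp only [pvRelaxPair, hcc]
        simp only [hg1, PySem.Set.contains_eq_decide, hm1]
        simp [hD2, hI1]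
      · simp only [pvRelaxPair, hcc]
        simp only [hg1, PySem.Set.contains_eq_decide, hm1]
        simp [hD2]
      · intro _; exact List.mem_append_right _ (by simp)
      · exact hm2
  · simp at c1
    have hc1 : ¬(pvInG ts.1.1 ts.1.2 = true ∧ ts.1 ∉ v) := fun h => absurd (c1 h.1) h.2
    have hD1cond : (pvInG ts.1.1 ts.1.2 && !(PySem.Dict.contains D ts.1)) = false := by
      rw [hcc, PySem.Set.contains_eq_decide]
      by_cases hg : pvInG ts.1.1 ts.1.2 = true
      · simp [hg, c1 hg]
      · simp [hg]
    by_cases c2 : (!(PySem.Set.contains v ts.2)) = true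
    · simp at c2
      have hg2 : pvInG ts.2.1 ts.2.2 = true := hslide.resolve_right c2
      have hD2 : PySem.Dict.contains D ts.2 = false := by
        rw [hcc, PySem.Set.contains_eq_decide]; simp [c2]
      refine ⟨[ts.2], ?_, ?_, ?_, ?_, ?_, ?_, ?_, ?_⟩
      · simp [pvStepPair, hc1, c2]
      · simp [pvStepPair, hc1, c2]
      · intro q hq; rw [List.mem_singleton.mp hq]; exact hg2
      · refine hnd.append (List.nodup_singleton _) ?_
        intro a ha hb
        rw [List.mem_singleton.mp hb] at ha
        exact c2 ha
      · simp only [pvRelaxPair, hD1cond, Bool.false_eq_true, if_false]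
        simp [hD2, PySem.Dict.items_insert_of_not_contains D _ hD2]
      · simp only [pvRelaxPair, hD1cond, Bool.false_eq_true, if_false]
        simp [hD2]
      · intro hg
        exact List.mem_append_left _ (by tauto)
      · exact List.mem_append_right _ (by simp)
    · simp at c2
      have hD2 : PySem.Dict.contains D ts.2 = true := by
        rw [hcc, PySem.Set.contains_eq_decide]; simp [c2]
      refine ⟨[], ?_, ?_, ?_, ?_, ?_, ?_, ?_, ?_⟩
      · simp [pvStepPair, hc1, c2]
      · simp [pvStepPair, hc1, c2]
      · intro q hq; simp at hq
      · simpa using hnd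
      · simp only [pvRelaxPair, hD1cond, Bool.false_eq_true, if_false]
        simp [hD2]
      · simp only [pvRelaxPair, hD1cond, Bool.false_eq_true, if_false]
        simp [hD2]
      · intro hg
        simpa using (by tauto : ts.1 ∈ v)
      · simpa using c2

theorem pvPairs_joint (end_ : Int × Int) (j : Int) :
    ∀ (ps : List ((Int × Int) × (Int × Int))) (v n : List (Int × Int)) (b : Bool)
      (D : PySem.Dict (Int × Int) Int) (ch : Bool),
      D.keys = v → List.Nodup v →
      (∀ ts ∈ ps, pvInG ts.2.1 ts.2.2 = true ∨ ts.2 ∈ v) →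
      ∃ δ : List (Int × Int),
        (ps.foldl (pvStepPair end_) (v, n, b)).1 = v ++ δ ∧
        (ps.foldl (pvStepPair end_) (v, n, b)).2.1 = n ++ δ ∧
        (∀ q ∈ δ, pvInG q.1 q.2 = true) ∧ List.Nodup (v ++ δ) ∧
        (ps.foldl (pvRelaxPair j) (D, ch)).1.items = D.items ++ δ.map (fun q => (q, j + 1)) ∧
        (ps.foldl (pvRelaxPair j) (D, ch)).2 = (ch || !δ.isEmpty) ∧
        (∀ ts ∈ ps, (pvInG ts.1.1 ts.1.2 = true → ts.1 ∈ v ++ δ) ∧ ts.2 ∈ v ++ δ) := by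
  intro ps
  induction ps with
  | nil =>
    intro v n b D ch hkeys hnd hyp
    exact ⟨[], by simp, by simp, by simp, by simpa using hnd, by simp, by simp, by simp⟩
  | cons p ps ih =>
    intro v n b D ch hkeys hnd hyp
    rw [List.foldl_cons, List.foldl_cons]
    obtain ⟨δ0, e1, e2, hg0, hn0, d1, d2, hmemp⟩ :=
      pvStep_joint end_ j v n b D ch p hkeys hnd (hyp p (by simp))
    rcases hsp : pvStepPair end_ (v, n, b) p with ⟨V, NN, B⟩
    rw [hsp] at e1 e2
    simp only at e1 e2
    subst e1; subst e2
    rcases hrp : pvRelaxPair j (D, ch) p with ⟨D1, CH1⟩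
    rw [hrp] at d1 d2
    simp only at d1 d2
    have hkeys1 : D1.keys = v ++ δ0 := by
      rw [show D1.keys = D1.items.map Prod.fst from rfl, d1, List.map_append,
        ← show D.keys = D.items.map Prod.fst from rfl, hkeys]
      simp [Function.comp_def]
    obtain ⟨δ1, f1, f2, hg1, hn1, g1, g2, hmem1⟩ := ih (v ++ δ0) (n ++ δ0) B D1 CH1 hkeys1 hn0
      (fun ts hts => (hyp ts (List.mem_cons_of_mem _ hts)).imp_right (List.mem_append_left _))
    refine ⟨δ0 ++ δ1, ?_, ?_, ?_, ?_, ?_, ?_, ?_⟩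
    · rw [f1, List.append_assoc]
    · rw [f2, List.append_assoc]
    · intro q hq
      rcases List.mem_append.mp hq with h | h
      · exact hg0 q h
      · exact hg1 q h
    · simpa [List.append_assoc] using hn1
    · rw [g1, d1]
      simp [List.append_assoc]
    · rw [g2, d2]
      cases δ0 <;> simp
    · intro ts hts
      rcases List.mem_cons.mp hts with rfl | hts'
      · refine ⟨fun hg => ?_, ?_⟩
        · rw [← List.append_assoc]
          exact List.mem_append_left _ (hmemp.1 hg)
        · rw [← List.append_assoc]
          exact List.mem_append_left _ hmemp.2
      · have := hmem1 ts hts'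
        rw [List.append_assoc] at this
        exact this

theorem pvItem_joint (board : List (List Int)) (end_ : Int × Int) (lv : Int) (u : Int × Int)
    (v n : List (Int × Int)) (b : Bool) (D : PySem.Dict (Int × Int) Int) (ch : Bool)
    (hkeys : D.keys = v) (hnd : List.Nodup v) (hu : u ∈ v) :
    ∃ δ : List (Int × Int),
      (pvProcCell board end_ (v, n, b) u).1 = v ++ δ ∧
      (pvProcCell board end_ (v, n, b) u).2.1 = n ++ δ ∧
      (∀ q ∈ δ, pvInG q.1 q.2 = true) ∧ List.Nodup (v ++ δ) ∧
      (pvRelaxItem board (D, ch) (u, lv)).1.items = D.items ++ δ.map (fun q => (q, lv + 1)) ∧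
      (pvRelaxItem board (D, ch) (u, lv)).2 = (ch || !δ.isEmpty) ∧
      pvClosed board (v ++ δ) u := by
  have hps : ∀ ts ∈ pvTargets board u, pvInG ts.2.1 ts.2.2 = true ∨ ts.2 ∈ v := by
    intro ts hts
    rcases List.mem_map.mp hts with ⟨d, _, rfl⟩
    rcases pvPair_slide_cases board u.1 u.2 d.1 d.2 with h | h
    · right; rw [h]; exact hu
    · left; exact h
  obtain ⟨δ, e1, e2, hg, hn, d1, d2, hcl⟩ :=
    pvPairs_joint end_ lv (pvTargets board u) v n b D ch hkeys hnd hps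
  have hRI : pvRelaxItem board (D, ch) (u, lv) = (pvTargets board u).foldl (pvRelaxPair lv) (D, ch) := by
    simp only [pvRelaxItem, pvTargets]
    exact List.foldl_map.symm
  exact ⟨δ, e1, e2, hg, hn, by rw [hRI]; exact d1, by rw [hRI]; exact d2, hcl⟩

theorem pvLevel_joint (board : List (List Int)) (end_ : Int × Int) (lv : Int) :
    ∀ (F : List (Int × Int)) (v n : List (Int × Int)) (b : Bool)
      (D : PySem.Dict (Int × Int) Int) (ch : Bool),
      D.keys = v → List.Nodup v → (∀ u ∈ F, u ∈ v) →
      ∃ δ : List (Int × Int),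
        (F.foldl (pvProcCell board end_) (v, n, b)).1 = v ++ δ ∧
        (F.foldl (pvProcCell board end_) (v, n, b)).2.1 = n ++ δ ∧
        (∀ q ∈ δ, pvInG q.1 q.2 = true) ∧ List.Nodup (v ++ δ) ∧
        ((F.map (fun u => (u, lv))).foldl (pvRelaxItem board) (D, ch)).1.items
          = D.items ++ δ.map (fun q => (q, lv + 1)) ∧
        ((F.map (fun u => (u, lv))).foldl (pvRelaxItem board) (D, ch)).2 = (ch || !δ.isEmpty) ∧
        (∀ u ∈ F, pvClosed board (v ++ δ) u) := by
  intro F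
  induction F with
  | nil =>
    intro v n b D ch hkeys hnd hF
    exact ⟨[], by simp, by simp, by simp, by simpa using hnd, by simp, by simp, by simp⟩
  | cons u F ih =>
    intro v n b D ch hkeys hnd hF
    rw [List.map_cons, List.foldl_cons, List.foldl_cons]
    obtain ⟨δ0, e1, e2, hg0, hn0, d1, d2, hcl0⟩ :=
      pvItem_joint board end_ lv u v n b D ch hkeys hnd (hF u (by simp))
    rcases hsp : pvProcCell board end_ (v, n, b) u with ⟨V, NN, B⟩
    rw [hsp] at e1 e2
    simp only at e1 e2
    subst e1; subst e2
    rcases hrp : pvRelaxItem board (D, ch) (u, lv) with ⟨D1, CH1⟩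
    rw [hrp] at d1 d2
    simp only at d1 d2
    have hkeys1 : D1.keys = v ++ δ0 := by
      rw [show D1.keys = D1.items.map Prod.fst from rfl, d1, List.map_append,
        ← show D.keys = D.items.map Prod.fst from rfl, hkeys]
      simp [Function.comp_def]
    obtain ⟨δ1, f1, f2, hg1, hn1, g1, g2, hcl1⟩ := ih (v ++ δ0) (n ++ δ0) B D1 CH1 hkeys1 hn0
      (fun q hq => List.mem_append_left _ (hF q (List.mem_cons_of_mem _ hq)))
    refine ⟨δ0 ++ δ1, ?_, ?_, ?_, ?_, ?_, ?_, ?_⟩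
    · rw [f1, List.append_assoc]
    · rw [f2, List.append_assoc]
    · intro q hq
      rcases List.mem_append.mp hq with h | h
      · exact hg0 q h
      · exact hg1 q h
    · simpa [List.append_assoc] using hn1
    · rw [g1, d1]
      simp [List.append_assoc]
    · rw [g2, d2]
      cases δ0 <;> simp
    · intro q hq
      rcases List.mem_cons.mp hq with rfl | hq'
      · rw [← List.append_assoc]
        exact pvClosed_mono board (v ++ δ0) δ1 q hcl0
      · have := hcl1 q hq'
        rw [List.append_assoc] at this
        exact this

-- relaxing a closed cell changes nothing
theorem pvRelaxPairs_noop (j : Int) :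
    ∀ (ps : List ((Int × Int) × (Int × Int))) (D : PySem.Dict (Int × Int) Int) (ch : Bool),
      (∀ ts ∈ ps, (pvInG ts.1.1 ts.1.2 = true → ts.1 ∈ D.keys) ∧ ts.2 ∈ D.keys) →
      ps.foldl (pvRelaxPair j) (D, ch) = (D, ch) := by
  intro ps
  induction ps with
  | nil => intro D ch _; rfl
  | cons ts ps ih =>
    intro D ch h
    obtain ⟨h1, h2⟩ := h ts (by simp)
    have hc2 : PySem.Dict.contains D ts.2 = true := by
      rw [PySem.Dict.contains_eq_decide_mem_keys]; simp [h2]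
    have hcond : (pvInG ts.1.1 ts.1.2 && !(PySem.Dict.contains D ts.1)) = false := by
      cases hgv : pvInG ts.1.1 ts.1.2 with
      | false => simp
      | true =>
        have hc1 : PySem.Dict.contains D ts.1 = true := by
          rw [PySem.Dict.contains_eq_decide_mem_keys]; simp [h1 hgv]
        simp [hc1]
    have hstep : pvRelaxPair j (D, ch) ts = (D, ch) := by
      simp [pvRelaxPair, hcond, hc2]
    rw [List.foldl_cons, hstep]
    exact ih D ch (fun ts' hts' => h ts' (List.mem_cons_of_mem _ hts'))

theorem pvRelaxFold_noop (board : List (List Int)) :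
    ∀ (P : List ((Int × Int) × Int)) (D : PySem.Dict (Int × Int) Int) (ch : Bool),
      (∀ p ∈ P, pvClosed board D.keys p.1) →
      P.foldl (pvRelaxItem board) (D, ch) = (D, ch) := by
  intro P
  induction P with
  | nil => intro D ch _; rfl
  | cons p P ih =>
    intro D ch h
    have hRI : pvRelaxItem board (D, ch) p = (pvTargets board p.1).foldl (pvRelaxPair p.2) (D, ch) := by
      simp only [pvRelaxItem, pvTargets]
      exact List.foldl_map.symm
    rw [List.foldl_cons, hRI, pvRelaxPairs_noop p.2 _ D ch (h p (by simp))]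
    exact ih D ch (fun q hq => h q (List.mem_cons_of_mem _ hq))

-- hit-flag characterization
theorem pvFlag_pairs (end_ : Int × Int) :
    ∀ (ps : List ((Int × Int) × (Int × Int))) (v n : List (Int × Int)) (b : Bool),
      (ps.foldl (pvStepPair end_) (v, n, b)).2.2 =
        (b || ps.any (fun ts => decide (ts.1 = end_) || decide (ts.2 = end_))) := by
  intro ps
  induction ps with
  | nil => intro v n b; simp
  | cons ts ps ih =>
    intro v n b
    rcases hsp : pvStepPair end_ (v, n, b) ts with ⟨V, NN, B⟩
    have hB : B = (b || (decide (ts.1 = end_) || decide (ts.2 = end_))) := by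
      have h3 : (pvStepPair end_ (v, n, b) ts).2.2
          = (b || (decide (ts.1 = end_) || decide (ts.2 = end_))) := by
        simp only [pvStepPair]
        by_cases h : ts.1 = end_ ∨ ts.2 = end_
        · rcases h with h | h <;> simp [h]
        · have h1 : ts.1 ≠ end_ := fun hh => h (Or.inl hh)
          have h2 : ts.2 ≠ end_ := fun hh => h (Or.inr hh)
          simp [h1, h2]
      rw [hsp] at h3
      exact h3
    rw [List.foldl_cons, hsp, ih V NN B, hB]
    simp [Bool.or_assoc]

theorem pvFlag_cells (board : List (List Int)) (end_ : Int × Int) :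
    ∀ (F : List (Int × Int)) (v n : List (Int × Int)) (b : Bool),
      (F.foldl (pvProcCell board end_) (v, n, b)).2.2 = (b || F.any (pvHit board end_)) := by
  intro F
  induction F with
  | nil => intro v n b; simp
  | cons u F ih =>
    intro v n b
    rcases hsp : pvProcCell board end_ (v, n, b) u with ⟨V, NN, B⟩
    have hB : B = (b || pvHit board end_ u) := by
      have h3 := pvFlag_pairs end_ (pvTargets board u) v n b
      rw [show (pvTargets board u).foldl (pvStepPair end_) (v, n, b)
          = pvProcCell board end_ (v, n, b) u from rfl, hsp] at h3
      exact h3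
    rw [List.foldl_cons, hsp, ih V NN B, hB]
    simp [pvHit, Bool.or_assoc]

-- phase-2 scan lemmas
theorem pvBestItem_eq (board : List (List Int)) (end_ : Int × Int) (best : Option Int)
    (it : (Int × Int) × Int) :
    pvBestItem board end_ best it = (pvTargets board it.1).foldl (pvBestPair end_ it.2) best := by
  simp only [pvBestItem, pvTargets]
  exact List.foldl_map.symm

theorem pvBestPairs_nohit (end_ : Int × Int) (j : Int) :
    ∀ (ps : List ((Int × Int) × (Int × Int))) (best : Option Int),
      ps.any (fun ts => decide (ts.1 = end_) || decide (ts.2 = end_)) = false →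
      ps.foldl (pvBestPair end_ j) best = best := by
  intro ps
  induction ps with
  | nil => intro best _; rfl
  | cons p ps ih =>
    intro best h
    simp only [List.any_cons, Bool.or_eq_false_iff] at h
    rw [List.foldl_cons, show pvBestPair end_ j best p = best from by simp [pvBestPair, h.1]]
    exact ih best h.2

theorem pvBestPairs_preserve (end_ : Int × Int) (j m : Int) (hm : m ≤ j + 1) :
    ∀ (ps : List ((Int × Int) × (Int × Int))),
      ps.foldl (pvBestPair end_ j) (some m) = some m := by
  intro ps
  induction ps with
  | nil => rfl
  | cons p ps ih =>
    rw [List.foldl_cons, show pvBestPair end_ j (some m) p = some m from by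
      simp only [pvBestPair]
      have hlt : decide (j + 1 < m) = false := by simp; omega
      simp [hlt]]
    exact ih

theorem pvBestPairs_hit (end_ : Int × Int) (j : Int) :
    ∀ (ps : List ((Int × Int) × (Int × Int))),
      ps.any (fun ts => decide (ts.1 = end_) || decide (ts.2 = end_)) = true →
      ps.foldl (pvBestPair end_ j) none = some (j + 1) := by
  intro ps
  induction ps with
  | nil => intro h; simp at h
  | cons p ps ih =>
    intro h
    rw [List.foldl_cons]
    by_cases hp : (decide (p.1 = end_) || decide (p.2 = end_)) = true
    · rw [show pvBestPair end_ j none p = some (j + 1) from by simp [pvBestPair, hp]]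
      exact pvBestPairs_preserve end_ j (j + 1) le_rfl ps
    · have hfalse : (decide (p.1 = end_) || decide (p.2 = end_)) = false := by
        simpa using hp
      rw [show pvBestPair end_ j none p = none from by simp [pvBestPair, hfalse]]
      refine ih ?_
      simpa [List.any_cons, hfalse] using h

theorem pvBestFold_nohit (board : List (List Int)) (end_ : Int × Int) :
    ∀ (L : List ((Int × Int) × Int)) (best : Option Int),
      (∀ p ∈ L, pvHit board end_ p.1 = false) →
      L.foldl (pvBestItem board end_) best = best := by
  intro L
  induction L with
  | nil => intro best _; rfl
  | cons p L ih =>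
    intro best h
    rw [List.foldl_cons, pvBestItem_eq,
      pvBestPairs_nohit end_ p.2 (pvTargets board p.1) best (h p (by simp))]
    exact ih best (fun q hq => h q (List.mem_cons_of_mem _ hq))

theorem pvBestFold_preserve (board : List (List Int)) (end_ : Int × Int) (m : Int) :
    ∀ (L : List ((Int × Int) × Int)),
      (∀ p ∈ L, m ≤ p.2 + 1) →
      L.foldl (pvBestItem board end_) (some m) = some m := by
  intro L
  induction L with
  | nil => intro _; rfl
  | cons p L ih =>
    intro h
    rw [List.foldl_cons, pvBestItem_eq,
      pvBestPairs_preserve end_ p.2 m (h p (by simp)) (pvTargets board p.1)]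
    exact ih (fun q hq => h q (List.mem_cons_of_mem _ hq))

theorem pvBestFold_block (board : List (List Int)) (end_ : Int × Int) (lv : Int) :
    ∀ (F : List (Int × Int)),
      F.any (pvHit board end_) = true →
      (F.map (fun u => (u, lv))).foldl (pvBestItem board end_) none = some (lv + 1) := by
  intro F
  induction F with
  | nil => intro h; simp at h
  | cons u F ih =>
    intro h
    rw [List.map_cons, List.foldl_cons]
    by_cases hu : pvHit board end_ u = true
    · rw [pvBestItem_eq, pvBestPairs_hit end_ lv (pvTargets board u) hu]
      refine pvBestFold_preserve board end_ (lv + 1) _ ?_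
      intro p hp
      rcases List.mem_map.mp hp with ⟨u', _, rfl⟩
      simp
    · have hfalse : pvHit board end_ u = false := by simpa using hu
      rw [pvBestItem_eq, pvBestPairs_nohit end_ lv (pvTargets board u) none hfalse]
      refine ih ?_
      simpa [List.any_cons, hfalse] using h

-- rounds after the decisive level only append entries with strictly larger labels
theorem pvRoundsRun (board : List (List Int)) (end_ : Int × Int) :
    ∀ (fuel : Nat) (D : PySem.Dict (Int × Int) Int) (v : List (Int × Int))
      (P : List ((Int × Int) × Int)) (F : List (Int × Int)) (lv : Int),
      D.keys = v → List.Nodup v → D.items = P ++ F.map (fun u => (u, lv)) →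
      (∀ p ∈ P, pvClosed board v p.1) → (∀ u ∈ F, u ∈ v) →
      ∃ T, (pvRounds board fuel D).items = D.items ++ T ∧ ∀ p ∈ T, lv + 1 ≤ p.2 := by
  intro fuel
  induction fuel with
  | zero =>
    intro D v P F lv hkeys hnd hitems hclosed hF
    exact ⟨[], by simp [pvRounds], by simp⟩
  | succ f ih =>
    intro D v P F lv hkeys hnd hitems hclosed hF
    obtain ⟨δ, e1, e2, hg, hn, d1, d2, hclF⟩ :=
      pvLevel_joint board end_ lv F v [] false D false hkeys hnd hF
    have hPfold : P.foldl (pvRelaxItem board) (D, false) = (D, false) :=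
      pvRelaxFold_noop board P D false (fun p hp => by rw [hkeys]; exact hclosed p hp)
    have hfold : D.items.foldl (pvRelaxItem board) (D, false)
        = (F.map (fun u => (u, lv))).foldl (pvRelaxItem board) (D, false) := by
      rw [hitems, List.foldl_append, hPfold]
    rcases hr : (F.map (fun u => (u, lv))).foldl (pvRelaxItem board) (D, false) with ⟨D1, CH1⟩
    rw [hr] at d1 d2
    simp only at d1 d2
    rw [show pvRounds board (f + 1) D
        = (let r := D.items.foldl (pvRelaxItem board) (D, false)
           if r.2 then pvRounds board f r.1 else r.1) from rfl, hfold, hr]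
    cases δ with
    | nil =>
      have hCH : CH1 = false := by simpa using d2
      refine ⟨[], ?_, by simp⟩
      simp only [hCH, Bool.false_eq_true, if_false]
      simpa using d1
    | cons q δ' =>
      have hCH : CH1 = true := by simpa using d2
      have hkeys1 : D1.keys = v ++ (q :: δ') := by
        rw [show D1.keys = D1.items.map Prod.fst from rfl, d1, List.map_append,
          ← show D.keys = D.items.map Prod.fst from rfl, hkeys]
        simp [Function.comp_def]
      obtain ⟨T', f1, f2⟩ := ih D1 (v ++ (q :: δ')) D.items (q :: δ') (lv + 1)
        hkeys1 hn d1
        (fun p hp => by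
          rw [hitems] at hp
          rcases List.mem_append.mp hp with h | h
          · exact pvClosed_mono board v (q :: δ') p.1 (hclosed p h)
          · rcases List.mem_map.mp h with ⟨u', hu', rfl⟩
            exact hclF u' hu')
        (fun u hu => List.mem_append_right _ hu)
      refine ⟨(q :: δ').map (fun u => (u, lv + 1)) ++ T', ?_, ?_⟩
      · simp only [hCH, if_true]
        rw [f1, d1, List.append_assoc]
      · intro p hp
        rcases List.mem_append.mp hp with h | h
        · rcases List.mem_map.mp h with ⟨u', _, rfl⟩
          simp
        · have := f2 p h
          omega

-- MAIN 2: level-synchronized BFS = relaxation-to-fixpoint plus minimum query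
theorem pvMain2 (board : List (List Int)) (end_ s0 : Int × Int) :
    ∀ (fB : Nat) (F : List (Int × Int)) (v : List (Int × Int)) (level : Int)
      (D : PySem.Dict (Int × Int) Int) (P : List ((Int × Int) × Int)),
      D.keys = v → List.Nodup v →
      D.items = P ++ F.map (fun u => (u, level)) →
      (∀ p ∈ P, pvHit board end_ p.1 = false) →
      (∀ p ∈ P, pvClosed board v p.1) →
      (∀ u ∈ F, u ∈ v) →
      (∀ p ∈ v, pvInG p.1 p.2 = true ∨ p = s0) →
      18 ≤ fB + v.length →
      pvFrontier board end_ fB F v level = pvBest board end_ (pvRounds board fB D) := by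
  intro fB
  induction fB with
  | zero =>
    intro F v level D P hkeys hnd hitems hnohit hclosed hF hall hfuel
    exact absurd (pvCard s0 v hnd hall) (by omega)
  | succ f ih =>
    intro F v level D P hkeys hnd hitems hnohit hclosed hF hall hfuel
    obtain ⟨δ, e1, e2, hg, hn, d1, d2, hclF⟩ :=
      pvLevel_joint board end_ level F v [] false D false hkeys hnd hF
    have hPfold : P.foldl (pvRelaxItem board) (D, false) = (D, false) :=
      pvRelaxFold_noop board P D false (fun p hp => by rw [hkeys]; exact hclosed p hp)
    have hfold : D.items.foldl (pvRelaxItem board) (D, false)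
        = (F.map (fun u => (u, level))).foldl (pvRelaxItem board) (D, false) := by
      rw [hitems, List.foldl_append, hPfold]
    rcases hr : (F.map (fun u => (u, level))).foldl (pvRelaxItem board) (D, false) with ⟨D1, CH1⟩
    rw [hr] at d1 d2
    simp only at d1 d2
    have hrounds : pvRounds board (f + 1) D = (if CH1 = true then pvRounds board f D1 else D1) := by
      rw [show pvRounds board (f + 1) D
          = (let r := D.items.foldl (pvRelaxItem board) (D, false)
             if r.2 then pvRounds board f r.1 else r.1) from rfl, hfold, hr]
    cases F with
    | nil =>
      have hδ : δ = [] := by simpa using e1.symm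
      have hD1 : D1 = D ∧ CH1 = false := by
        have : ((D, false) : PySem.Dict (Int × Int) Int × Bool) = (D1, CH1) := by simpa using hr
        exact ⟨(Prod.mk.injEq _ _ _ _ ▸ this).1.symm, (Prod.mk.injEq _ _ _ _ ▸ this).2.symm⟩
      rw [show pvFrontier board end_ (f + 1) [] v level = none from rfl, hrounds,
        hD1.2, if_neg (by simp), hD1.1]
      have hPitems : D.items = P := by simpa using hitems
      unfold pvBest
      rw [hPitems, pvBestFold_nohit board end_ P none hnohit]
    | cons u F' =>
      rw [show pvFrontier board end_ (f + 1) (u :: F') v level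
          = (let r := (u :: F').foldl (pvProcCell board end_) (v, [], false)
             if r.2.2 = true then some (level + 1)
             else pvFrontier board end_ f r.2.1 r.1 (level + 1)) from rfl]
      rcases hrB : (u :: F').foldl (pvProcCell board end_) (v, [], false) with ⟨V1, N1, B1⟩
      rw [hrB] at e1 e2
      simp only at e1 e2
      rw [List.nil_append] at e2
      subst e1; subst e2
      have hflag : B1 = (u :: F').any (pvHit board end_) := by
        have h3 := pvFlag_cells board end_ (u :: F') v [] false
        rw [hrB] at h3
        simpa using h3
      have hCH : CH1 = !N1.isEmpty := by simpa using d2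
      by_cases hB : B1 = true
      · simp only [hB, if_true]
        rw [hrounds]
        have hany : (u :: F').any (pvHit board end_) = true := by rw [← hflag]; exact hB
        -- final items = D.items ++ R with all R-labels ≥ level + 1
        obtain ⟨R, hRitems, hRval⟩ :
            ∃ R, (if CH1 = true then pvRounds board f D1 else D1).items = D.items ++ R ∧
              ∀ p ∈ R, level ≤ p.2 := by
          cases N1 with
          | nil =>
            rw [hCH]
            exact ⟨[], by simpa using d1, by simp⟩
          | cons q δ' =>
            rw [hCH]
            have hkeys1 : D1.keys = v ++ (q :: δ') := by
              rw [show D1.keys = D1.items.map Prod.fst from rfl, d1, List.map_append,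
                ← show D.keys = D.items.map Prod.fst from rfl, hkeys]
              simp [Function.comp_def]
            obtain ⟨T, t1, t2⟩ := pvRoundsRun board end_ f D1 (v ++ (q :: δ')) D.items
              (q :: δ') (level + 1) hkeys1 hn d1
              (fun p hp => by
                rw [hitems] at hp
                rcases List.mem_append.mp hp with h | h
                · exact pvClosed_mono board v (q :: δ') p.1 (hclosed p h)
                · rcases List.mem_map.mp h with ⟨u', hu', rfl⟩
                  exact hclF u' hu')
              (fun w hw => List.mem_append_right _ hw)
            refine ⟨(q :: δ').map (fun w => (w, level + 1)) ++ T, ?_, ?_⟩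
            · rw [if_pos (by simp)]
              rw [t1, d1, List.append_assoc]
            · intro p hp
              rcases List.mem_append.mp hp with h | h
              · rcases List.mem_map.mp h with ⟨w, _, rfl⟩
                simp
              · have := t2 p h
                omega
        unfold pvBest
        rw [hRitems, hitems, List.append_assoc, List.foldl_append,
          pvBestFold_nohit board end_ P none hnohit, List.foldl_append,
          pvBestFold_block board end_ level (u :: F') hany,
          pvBestFold_preserve board end_ (level + 1) R (fun p hp => by have := hRval p hp; omega)]
      · have hB1 : B1 = false := by simpa using hB
        simp only [hB1, Bool.false_eq_true, if_false]
        rw [hrounds]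
        have hnohitF : ∀ w ∈ (u :: F'), pvHit board end_ w = false := by
          intro w hw
          have := hflag
          rw [hB1] at this
          have hh := this.symm
          rw [List.any_eq_false] at hh
          simpa using hh w hw
        cases N1 with
        | nil =>
          rw [hCH, if_neg (by simp)]
          rw [show pvFrontier board end_ f [] (v ++ []) (level + 1) = none from by
            cases f <;> rfl]
          unfold pvBest
          rw [show D1.items = P ++ (u :: F').map (fun w => (w, level)) from by
            rw [← hitems]; simpa using d1,
            List.foldl_append, pvBestFold_nohit board end_ P none hnohit,
            pvBestFold_nohit board end_ _ none (fun p hp => by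
              rcases List.mem_map.mp hp with ⟨w, hw, rfl⟩
              exact hnohitF w hw)]
        | cons q δ' =>
          rw [hCH, if_pos (by simp)]
          have hkeys1 : D1.keys = v ++ (q :: δ') := by
            rw [show D1.keys = D1.items.map Prod.fst from rfl, d1, List.map_append,
              ← show D.keys = D.items.map Prod.fst from rfl, hkeys]
            simp [Function.comp_def]
          refine ih (q :: δ') (v ++ (q :: δ')) (level + 1) D1 D.items hkeys1 hn d1
            (fun p hp => by
              rw [hitems] at hp
              rcases List.mem_append.mp hp with h | h
              · exact hnohit p h
              · rcases List.mem_map.mp h with ⟨w, hw, rfl⟩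
                exact hnohitF w hw)
            (fun p hp => by
              rw [hitems] at hp
              rcases List.mem_append.mp hp with h | h
              · exact pvClosed_mono board v (q :: δ') p.1 (hclosed p h)
              · rcases List.mem_map.mp h with ⟨w, hw, rfl⟩
                exact hclF w hw)
            (fun w hw => List.mem_append_right _ hw)
            (fun p hp => by
              rcases List.mem_append.mp hp with h | h
              · exact hall p h
              · exact Or.inl (hg p h))
            (by
              have := List.length_append (as := v) (bs := (q :: δ'))
              simp only [List.length_cons] at this ⊢
              omega)

-- ================= first half (from A's deque to the level-synchronized BFS) ====================

theorem pvFoldPairs_ext (end_ : Int × Int) :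
    ∀ (ps : List ((Int × Int) × (Int × Int))) (v : PySem.Set (Int × Int))
      (n : List (Int × Int)) (b : Bool),
      (∀ p ∈ ps, pvInG p.2.1 p.2.2 = true ∨ p.2 ∈ v) → List.Nodup v →
      ∃ δ : List (Int × Int),
        (ps.foldl (pvStepPair end_) (v, n, b)).1 = v ++ δ ∧
        (ps.foldl (pvStepPair end_) (v, n, b)).2.1 = n ++ δ ∧
        (∀ q ∈ δ, pvInG q.1 q.2 = true) ∧ List.Nodup (v ++ δ) := by
  intro ps
  induction ps with
  | nil => intro v n b _ hv; exact ⟨[], by simp, by simp, by simp, by simpa using hv⟩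
  | cons p ps ih =>
    intro v n b hyp hv
    rw [List.foldl_cons]
    obtain ⟨δ0, e1, e2, hg0, hn0⟩ := pvStep_ext end_ v n b p (hyp p (by simp)) hv
    rcases hsp : pvStepPair end_ (v, n, b) p with ⟨V, NN, B⟩
    rw [hsp] at e1 e2
    simp only at e1 e2
    subst e1; subst e2
    obtain ⟨δ1, f1, f2, hg1, hn1⟩ := ih (v ++ δ0) (n ++ δ0) B
      (fun q hq => (hyp q (List.mem_cons_of_mem _ hq)).imp_right
        (fun h => List.mem_append_left _ h)) hn0
    refine ⟨δ0 ++ δ1, ?_, ?_, ?_, ?_⟩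
    · rw [f1, List.append_assoc]
    · rw [f2, List.append_assoc]
    · intro q hq
      rcases List.mem_append.mp hq with h | h
      · exact hg0 q h
      · exact hg1 q h
    · simpa [List.append_assoc] using hn1

theorem pvProcCells_ext (board : List (List Int)) (end_ : Int × Int) :
    ∀ (F : List (Int × Int)) (v : PySem.Set (Int × Int)) (n : List (Int × Int)) (b : Bool),
      (∀ cell ∈ F, cell ∈ v) → List.Nodup v →
      ∃ δ : List (Int × Int),
        (F.foldl (pvProcCell board end_) (v, n, b)).1 = v ++ δ ∧
        (F.foldl (pvProcCell board end_) (v, n, b)).2.1 = n ++ δ ∧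
        (∀ q ∈ δ, pvInG q.1 q.2 = true) ∧ List.Nodup (v ++ δ) := by
  intro F
  induction F with
  | nil => intro v n b _ hv; exact ⟨[], by simp, by simp, by simp, by simpa using hv⟩
  | cons cell F ih =>
    intro v n b hyp hv
    rw [List.foldl_cons]
    have hps : ∀ p ∈ pvTargets board cell, pvInG p.2.1 p.2.2 = true ∨ p.2 ∈ v := by
      intro p hp
      rcases List.mem_map.mp hp with ⟨d, _, rfl⟩
      rcases pvPair_slide_cases board cell.1 cell.2 d.1 d.2 with h | h
      · right; rw [h]; exact hyp cell (by simp)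
      · left; exact h
    obtain ⟨δ0, e1, e2, hg0, hn0⟩ := pvFoldPairs_ext end_ (pvTargets board cell) v n b hps hv
    rcases hsp : pvProcCell board end_ (v, n, b) cell with ⟨V, NN, B⟩
    rw [show (pvTargets board cell).foldl (pvStepPair end_) (v, n, b) =
        pvProcCell board end_ (v, n, b) cell from rfl, hsp] at e1 e2
    simp only at e1 e2
    subst e1; subst e2
    obtain ⟨δ1, f1, f2, hg1, hn1⟩ := ih (v ++ δ0) (n ++ δ0) B
      (fun q hq => List.mem_append_left _ (hyp q (List.mem_cons_of_mem _ hq))) hn0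
    refine ⟨δ0 ++ δ1, ?_, ?_, ?_, ?_⟩
    · rw [f1, List.append_assoc]
    · rw [f2, List.append_assoc]
    · intro q hq
      rcases List.mem_append.mp hq with h | h
      · exact hg0 q h
      · exact hg1 q h
    · simpa [List.append_assoc] using hn1

-- LEVEL correspondence: processing one whole BFS level of A's queue = one fold of the frontier
theorem pvLevel (board : List (List Int)) (end_ : Int × Int) (c : Int) :
    ∀ (F : List (Int × Int)) (fA : Nat) (N : List (Int × Int)) (v : PySem.Set (Int × Int)),
      pvLoopA board end_ (fA + F.length) (pvMapc c F ++ pvMapc (c + 1) N) v =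
        (let r := F.foldl (pvProcCell board end_) (v, N, false)
         if r.2.2 = true then some (c + 1)
         else pvLoopA board end_ fA (pvMapc (c + 1) r.2.1) r.1) := by
  intro F
  induction F with
  | nil => intro fA N v; rfl
  | cons p F ih =>
    intro fA N v
    have hfuel : fA + (p :: F).length = (fA + F.length) + 1 := by
      simp [List.length_cons]; omega
    rw [hfuel]
    rw [show pvLoopA board end_ ((fA + F.length) + 1) (pvMapc c (p :: F) ++ pvMapc (c + 1) N) v =
        (match pvDirsA board end_ p.1 p.2 c pvDirsAList (pvMapc c F ++ pvMapc (c + 1) N) v with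
         | .inl a => some a
         | .inr (q', v') => pvLoopA board end_ (fA + F.length) q' v') from rfl]
    rw [pvNode board end_ p.1 p.2 c F pvDirsAList N v]
    rw [show (pvDirsAList.map (fun d => pvPairFor board p.1 p.2 d.1 d.2)).foldl
          (pvStepPair end_) (v, N, false) =
        pvProcCell board end_ (v, N, false) p from rfl]
    rcases hr : pvProcCell board end_ (v, N, false) p with ⟨V1, N1, B1⟩
    cases B1 with
    | true =>
      have h2 : (List.foldl (pvProcCell board end_) (V1, N1, true) F).2.2 = true :=
        pvProcCells_hit board end_ F V1 N1
      simp [hr, h2]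
    | false =>
      have hF : (p :: F).foldl (pvProcCell board end_) (v, N, false) =
          F.foldl (pvProcCell board end_) (V1, N1, false) := by
        rw [List.foldl_cons, hr]
      simpa [hr, hF] using ih fA N1 V1

-- MAIN 1: A's deque BFS = the level-synchronized BFS
theorem pvMain (board : List (List Int)) (end_ s0 : Int × Int) :
    ∀ (fB : Nat) (F : List (Int × Int)) (v : PySem.Set (Int × Int)) (c : Int) (fA : Nat),
      (∀ p ∈ F, p ∈ v) → List.Nodup v →
      (∀ p ∈ v, pvInG p.1 p.2 = true ∨ p = s0) →
      F.length + 17 ≤ fA + v.length → 18 ≤ fB + v.length →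
      pvLoopA board end_ fA (pvMapc c F) v = pvFrontier board end_ fB F v c := by
  intro fB
  induction fB with
  | zero =>
    intro F v c fA hFv hnd hall h4 h5
    exact absurd (pvCard s0 v hnd hall) (by omega)
  | succ fB ih =>
    intro F v c fA hFv hnd hall h4 h5
    cases F with
    | nil => simp [pvLoopA, pvFrontier, pvMapc]
    | cons p F' =>
      have hcard := pvCard s0 v hnd hall
      have hFlen : (p :: F').length ≤ fA := by
        have := List.length_cons (a := p) (as := F')
        omega
      have hsplit : fA = (fA - (p :: F').length) + (p :: F').length := by omega
      rw [hsplit]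
      have hlev := pvLevel board end_ c (p :: F') (fA - (p :: F').length) [] v
      rw [show pvMapc c (p :: F') ++ pvMapc (c + 1) [] = pvMapc c (p :: F') from by
        simp [pvMapc]] at hlev
      rw [hlev]
      rw [show pvFrontier board end_ (fB + 1) (p :: F') v c =
          (let r := (p :: F').foldl (pvProcCell board end_) (v, [], false)
           if r.2.2 = true then some (c + 1)
           else pvFrontier board end_ fB r.2.1 r.1 (c + 1)) from rfl]
      obtain ⟨δ, e1, e2, hgrid, hnd'⟩ :=
        pvProcCells_ext board end_ (p :: F') v [] false hFv hnd
      rcases hr : (p :: F').foldl (pvProcCell board end_) (v, [], false) with ⟨V1, N1, B1⟩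
      rw [hr] at e1 e2
      simp only at e1 e2
      rw [List.nil_append] at e2
      cases B1 with
      | true => simp
      | false =>
        simp only [Bool.false_eq_true, if_false]
        rw [e1, e2]
        by_cases hδ : δ = []
        · rw [hδ]
          simp [pvLoopA, pvFrontier, pvMapc]
        · have hlen1 : 1 ≤ δ.length := by
            cases δ with
            | nil => exact absurd rfl hδ
            | cons a l => simp
          refine ih δ (v ++ δ) (c + 1) (fA - (p :: F').length)
            (fun q hq => List.mem_append_right _ hq) hnd' (fun q hq => ?_) ?_ ?_
          · rcases List.mem_append.mp hq with h | h
            · exact hall q h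
            · exact Or.inl (hgrid q h)
          · have hlen := List.length_append (as := v) (bs := δ)
            omega
          · have hlen := List.length_append (as := v) (bs := δ)
            omega

-- ===== VERDICT (by name: the statement is the Claim_ definition above) =====
theorem move_cost_spec : Claim_equal_move_cost := by
  intro board start end_ _ _
  unfold Spec_move_cost move_cost move_cost_alt
  by_cases h : start = end_
  · rw [if_pos h, if_pos h]
  · rw [if_neg h, if_neg h]
    have hv : PySem.Set.ofList [start] = [start] :=
      PySem.Set.ofList_eq_self_of_nodup [start] (List.nodup_singleton _)
    rw [hv]
    rw [show [((start.1 : Int), start.2, (0 : Int))] = pvMapc 0 [start] from rfl]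
    rw [pvMain board end_ start 32 [start] [start] 0 32 (by simp) (by simp)
      (by intro p hp; rw [List.mem_singleton.mp hp]; exact Or.inr rfl) (by simp) (by simp)]
    refine pvMain2 board end_ start 32 [start] [start] 0
      (PySem.Dict.insert PySem.Dict.empty start 0) [] ?_ (by simp) ?_ (by simp) (by simp)
      (by simp) (by intro p hp; rw [List.mem_singleton.mp hp]; exact Or.inr rfl) (by simp)
    · rw [show (PySem.Dict.insert PySem.Dict.empty start (0 : Int)).keys
          = (PySem.Dict.insert PySem.Dict.empty start (0 : Int)).items.map Prod.fst from rfl,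
        PySem.Dict.items_insert_of_not_contains PySem.Dict.empty _ (by simp)]
      simp [PySem.Dict.empty]
    · rw [PySem.Dict.items_insert_of_not_contains PySem.Dict.empty _ (by simp)]
      simp [PySem.Dict.empty]
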